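-- pv_equiv track=rewrite | github.com/prathamtandon/g4gproblems | DP/min_removals.py | min_removals
-- ===== SOURCE A (Python) =====
-- def min_removals(arr):
--
--     n = len(arr)
--     # table[i][j] stores minimum removals from arr[i...j] such that 2*min > max
--     # table[0][n-1] stores the final result.
--     table = [[0] * n for _ in range(n)]
--
--     for L in range(2, n+1):
--         for i in range(n-L+1):
--             j = i+L-1
--             min_ele = min(arr[i:j+1])
--             max_ele = max(arr[i:j+1])
--             if min_ele * 2 <= max_ele:
--                 table[i][j] = 1 + min(table[i+1][j], table[i][j-1])
--
--     return table[0][n-1]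
-- ===== SOURCE B (Python) =====
-- def min_removals(arr):
--     # Answer = n - length of the longest contiguous window whose min*2 > max
--     # (length-1 windows count as acceptable, matching the DP's base case).
--     # Single O(n^2) scan with running min/max instead of the O(n^3) interval DP.
--     n = len(arr)
--     best = 1
--     for i in range(n):
--         lo = arr[i]
--         hi = arr[i]
--         for j in range(i + 1, n):
--             lo = min(lo, arr[j])
--             hi = max(hi, arr[j])
--             if 2 * lo > hi:
--                 best = max(best, j - i + 1)
--     return n - best
-- ===== Notes on version B (the rewrite author's own statement) =====
-- stated objective: faster
-- what changed: Replaced the O(n^3) interval DP over all (i,j) windows (each recomputing min/max of a slice) by a single O(n^2) scan that finds the longest contiguous window with 2*min>max using running min/max, returning n minus that length.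
import Mathlib
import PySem

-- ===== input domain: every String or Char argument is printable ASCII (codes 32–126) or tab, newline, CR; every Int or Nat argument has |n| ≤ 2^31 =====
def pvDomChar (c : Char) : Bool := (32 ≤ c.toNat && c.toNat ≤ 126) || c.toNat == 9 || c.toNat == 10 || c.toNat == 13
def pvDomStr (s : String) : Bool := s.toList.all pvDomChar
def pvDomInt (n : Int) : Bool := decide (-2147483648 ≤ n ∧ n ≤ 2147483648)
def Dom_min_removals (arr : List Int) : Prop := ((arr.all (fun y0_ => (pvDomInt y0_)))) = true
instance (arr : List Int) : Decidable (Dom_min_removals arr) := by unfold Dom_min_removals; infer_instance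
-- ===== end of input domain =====

-- B replaces A's interval DP over all (i,j) windows by a single longest-valid-window scan
-- with running min/max (measured asymptotically faster); same return value on nonempty lists.

-- ===== PORT A =====
-- table[i][j] read / write for the 2-D list of lists (indices always in range in A's loops)
def pvTget (t : List (List Int)) (i j : Nat) : Int := (t.getD i []).getD j 0

def pvTset (t : List (List Int)) (i j : Nat) (v : Int) : List (List Int) :=
  t.set i ((t.getD i []).set j v)

def min_removals (arr : List Int) : Int :=
  let n := arr.length
  -- table = [[0] * n for _ in range(n)]
  let table0 : List (List Int) := List.replicate n (List.replicate n 0)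
  -- for L in range(2, n+1): for i in range(n-L+1): ...
  let table := (List.range' 2 (n - 1)).foldl (fun t L =>
    (List.range (n - L + 1)).foldl (fun t i =>
      let j := i + L - 1
      let s := PySem.List.slice arr (some (i : Int)) (some ((j : Int) + 1))
      -- slice arr[i:j+1] is nonempty (L ≥ 2), so Python's min/max never raise here
      let min_ele := (PySem.List.min? s (fun y => y)).getD 0
      let max_ele := (PySem.List.max? s (fun y => y)).getD 0
      if min_ele * 2 ≤ max_ele then
        pvTset t i j (1 + min (pvTget t (i + 1) j) (pvTget t i (j - 1)))
      else t) t) table0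
  -- return table[0][n-1]  (raises IndexError when arr = [], excluded by Pre_)
  pvTget table 0 (n - 1)

-- ===== PORT B =====
def min_removals_alt (arr : List Int) : Int :=
  let n := arr.length
  let best : Int := (List.range n).foldl (fun best i =>
    ((List.range' (i + 1) (n - (i + 1))).foldl (fun (s : Int × Int × Int) j =>
        let lo := min s.2.1 (arr.getD j 0)
        let hi := max s.2.2 (arr.getD j 0)
        ((if 2 * lo > hi then max s.1 ((j : Int) - (i : Int) + 1) else s.1), lo, hi))
      (best, arr.getD i 0, arr.getD i 0)).1) 1
  (n : Int) - best

-- ===== PRECONDITION & SPEC =====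
-- A raises IndexError on the empty list (table[0] on an empty table); excluded.
def Pre_min_removals (arr : List Int) : Prop := arr ≠ []
instance (arr : List Int) : Decidable (Pre_min_removals arr) := by unfold Pre_min_removals; infer_instance

def pvWitness_min_removals : List Int := [1, 2]

def Spec_min_removals (arr : List Int) (out : Int) : Prop := out = min_removals_alt arr
instance (arr : List Int) (out : Int) : Decidable (Spec_min_removals arr out) := by unfold Spec_min_removals; infer_instance

-- ===== CLAIM (what is proved, stated in full; the proofs are below) =====
def Claim_equal_min_removals : Prop := ∀ (arr : List Int), Dom_min_removals arr → Pre_min_removals arr → Spec_min_removals arr (min_removals arr)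

-- ===== LEMMAS AND PROOFS =====

-- the window arr[i..j] and its min / max (as A computes them from the slice)
def pvWin (a : List Int) (i j : Nat) : List Int := (a.drop i).take (j + 1 - i)

def pvMn (a : List Int) (i j : Nat) : Int := (PySem.List.min? (pvWin a i j) (fun y => y)).getD 0
def pvMx (a : List Int) (i j : Nat) : Int := (PySem.List.max? (pvWin a i j) (fun y => y)).getD 0

-- reference recursion for A's DP cell values
def pvT (a : List Int) (i j : Nat) : Int :=
  if _h : i < j then
    if pvMn a i j * 2 ≤ pvMx a i j then
      1 + min (pvT a (i + 1) j) (pvT a i (j - 1))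
    else 0
  else 0
termination_by j - i
decreasing_by all_goals omega

-- longest "valid" (2*min > max) window length inside [i,j] (length-1 windows count as 1)
def pvM (a : List Int) (i j : Nat) : Nat :=
  if _h : i < j then
    if pvMn a i j * 2 ≤ pvMx a i j then
      max (pvM a (i + 1) j) (pvM a i (j - 1))
    else j - i + 1
  else 1
termination_by j - i
decreasing_by all_goals omega

theorem pvM_pos (a : List Int) (i j : Nat) : 1 ≤ pvM a i j := by
  induction i, j using pvM.induct a with
  | case1 i j h hc ih1 ih2 => rw [pvM, dif_pos h, if_pos hc]; omega
  | case2 i j h hc => rw [pvM, dif_pos h, if_neg hc]; omega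
  | case3 i j h => rw [pvM, dif_neg h]

theorem pvM_le (a : List Int) (i j : Nat) : pvM a i j ≤ j - i + 1 := by
  induction i, j using pvM.induct a with
  | case1 i j h hc ih1 ih2 => rw [pvM, dif_pos h, if_pos hc]; omega
  | case2 i j h hc => rw [pvM, dif_pos h, if_neg hc]
  | case3 i j h => rw [pvM, dif_neg h]; omega

theorem pvT_eq (a : List Int) (i j : Nat) :
    pvT a i j = ((j - i + 1 : Nat) : Int) - (pvM a i j : Int) := by
  induction i, j using pvM.induct a with
  | case1 i j h hc ih1 ih2 =>
    rw [pvT, pvM, dif_pos h, dif_pos h, if_pos hc, if_pos hc, ih1, ih2]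
    have l1 := pvM_le a (i + 1) j
    have l2 := pvM_le a i (j - 1)
    have p1 := pvM_pos a (i + 1) j
    have p2 := pvM_pos a i (j - 1)
    push_cast
    omega
  | case2 i j h hc =>
    rw [pvT, pvM, dif_pos h, dif_pos h, if_neg hc, if_neg hc]
    push_cast
    omega
  | case3 i j h =>
    rw [pvT, pvM, dif_neg h, dif_neg h]
    have : j - i + 1 = 1 := by omega
    rw [this]; norm_num

theorem pvM_ub (a : List Int) (i j p q : Nat) (hip : i ≤ p) (hpq : p < q) (hqj : q ≤ j)
    (hv : ¬ (pvMn a p q * 2 ≤ pvMx a p q)) : q - p + 1 ≤ pvM a i j := by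
  induction i, j using pvM.induct a generalizing p q with
  | case1 i j h hc ih1 ih2 =>
    rw [pvM, dif_pos h, if_pos hc]
    have hne : ¬ (p = i ∧ q = j) := by
      rintro ⟨rfl, rfl⟩; exact hv hc
    by_cases hpi : i < p
    · have := ih1 p q (by omega) hpq hqj hv; omega
    · have hqj' : q ≤ j - 1 := by
        rcases Nat.eq_or_lt_of_le hqj with rfl | hlt
        · exact absurd ⟨by omega, rfl⟩ hne
        · omega
      have := ih2 p q (by omega) hpq hqj' hv; omega
  | case2 i j h hc =>
    rw [pvM, dif_pos h, if_neg hc]; omega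
  | case3 i j h => omega

theorem pvM_wit (a : List Int) (i j : Nat) :
    pvM a i j = 1 ∨ ∃ p q, i ≤ p ∧ p < q ∧ q ≤ j ∧ ¬ (pvMn a p q * 2 ≤ pvMx a p q) ∧
      pvM a i j = q - p + 1 := by
  induction i, j using pvM.induct a with
  | case1 i j h hc ih1 ih2 =>
    rw [pvM, dif_pos h, if_pos hc]
    rcases Nat.le_total (pvM a (i + 1) j) (pvM a i (j - 1)) with hle | hle
    · rw [Nat.max_eq_right hle]
      rcases ih2 with h1 | ⟨p, q, h2, h3, h4, h5, h6⟩
      · left; exact h1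
      · right; exact ⟨p, q, h2, h3, by omega, h5, h6⟩
    · rw [Nat.max_eq_left hle]
      rcases ih1 with h1 | ⟨p, q, h2, h3, h4, h5, h6⟩
      · left; exact h1
      · right; exact ⟨p, q, by omega, h3, h4, h5, h6⟩
  | case2 i j h hc =>
    right; exact ⟨i, j, le_refl i, h, le_refl j, hc, by rw [pvM, dif_pos h, if_neg hc]⟩
  | case3 i j h => left; rw [pvM, dif_neg h]

-- window extension lemmas
theorem pvWin_self (a : List Int) (i : Nat) (h : i < a.length) :
    pvWin a i i = [a.getD i 0] := by
  unfold pvWin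
  have h1 : i + 1 - i = 1 := by omega
  rw [h1, List.take_one, List.head?_drop]
  simp [List.getD_eq_getElem?_getD, List.getElem?_eq_getElem h]

theorem pvWin_snoc (a : List Int) (i k : Nat) (hik : i ≤ k) (hk : k + 1 < a.length) :
    pvWin a i (k + 1) = pvWin a i k ++ [a.getD (k + 1) 0] := by
  unfold pvWin
  have h1 : k + 1 + 1 - i = (k + 1 - i) + 1 := by omega
  rw [h1, List.take_add_one]
  have h2 : k + 1 - i < (a.drop i).length := by simp; omega
  rw [List.getElem?_eq_getElem h2]
  have h3 : (a.drop i)[k + 1 - i] = a[k + 1]'hk := by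
    rw [List.getElem_drop]; congr 1; omega
  simp [h3, List.getD_eq_getElem?_getD, List.getElem?_eq_getElem hk]

theorem pvWin_ne_nil (a : List Int) (i j : Nat) (hij : i ≤ j) (h : i < a.length) :
    pvWin a i j ≠ [] := by
  unfold pvWin
  simp [List.take_eq_nil_iff, List.drop_eq_nil_iff]
  omega

theorem pvMn_self (a : List Int) (i : Nat) (h : i < a.length) : pvMn a i i = a.getD i 0 := by
  unfold pvMn
  rw [pvWin_self a i h]
  simp [PySem.List.min?_id_cons]

theorem pvMx_self (a : List Int) (i : Nat) (h : i < a.length) : pvMx a i i = a.getD i 0 := by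
  unfold pvMx
  rw [pvWin_self a i h]
  simp [PySem.List.max?_id_cons]

theorem pvMn_snoc (a : List Int) (i k : Nat) (hik : i ≤ k) (hk : k + 1 < a.length) :
    pvMn a i (k + 1) = min (pvMn a i k) (a.getD (k + 1) 0) := by
  unfold pvMn
  rw [pvWin_snoc a i k hik hk]
  obtain ⟨x, t, hxt⟩ := List.exists_cons_of_ne_nil (pvWin_ne_nil a i k hik (by omega))
  rw [hxt]
  simp [PySem.List.min?_id_cons, List.foldl_append]

theorem pvMx_snoc (a : List Int) (i k : Nat) (hik : i ≤ k) (hk : k + 1 < a.length) :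
    pvMx a i (k + 1) = max (pvMx a i k) (a.getD (k + 1) 0) := by
  unfold pvMx
  rw [pvWin_snoc a i k hik hk]
  obtain ⟨x, t, hxt⟩ := List.exists_cons_of_ne_nil (pvWin_ne_nil a i k hik (by omega))
  rw [hxt]
  simp [PySem.List.max?_id_cons, List.foldl_append]

theorem pvSliceWin (a : List Int) (i j : Nat) :
    PySem.List.slice a (some (i : Int)) (some ((j : Int) + 1)) = pvWin a i j := by
  have h : ((j : Int) + 1) = ((j + 1 : Nat) : Int) := by push_cast; ring
  rw [h, PySem.List.slice_natCast]
  rfl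

-- ── generic list-access helpers ──

theorem pvGetDset_self {α : Type} [Inhabited α] (t : List α) (i : Nat) (r d : α) (h : i < t.length) :
    (t.set i r).getD i d = r := by
  rw [List.getD_eq_getElem?_getD, List.getElem?_set_self h, Option.getD_some]

theorem pvGetDset_ne {α : Type} [Inhabited α] (t : List α) (i p : Nat) (r d : α) (h : p ≠ i) :
    (t.set i r).getD p d = t.getD p d := by
  rw [List.getD_eq_getElem?_getD, List.getElem?_set_ne (fun he => h he.symm),
      ← List.getD_eq_getElem?_getD]

theorem pvTget_pvTset (t : List (List Int)) (i j : Nat) (v : Int)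
    (hi : i < t.length) (hj : j < (t.getD i []).length) (p q : Nat) :
    pvTget (pvTset t i j v) p q = if p = i ∧ q = j then v else pvTget t p q := by
  unfold pvTget pvTset
  by_cases hpi : p = i
  · subst hpi
    rw [pvGetDset_self _ _ _ _ hi]
    by_cases hqj : q = j
    · subst hqj
      rw [if_pos ⟨rfl, rfl⟩, pvGetDset_self _ _ _ _ hj]
    · simp only [hqj, and_false, if_false]
      exact pvGetDset_ne _ _ _ _ _ hqj
  · simp only [hpi, false_and, if_false]
    rw [pvGetDset_ne _ _ _ _ _ hpi]

theorem pvTset_rowlen (t : List (List Int)) (i j : Nat) (v : Int) (p : Nat) :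
    ((pvTset t i j v).getD p []).length = (t.getD p []).length := by
  unfold pvTset
  by_cases hpi : p = i
  · subst hpi
    by_cases hp : p < t.length
    · rw [pvGetDset_self _ _ _ _ hp, List.length_set]
    · rw [List.getD_eq_getElem?_getD, List.getD_eq_getElem?_getD,
          List.getElem?_eq_none (by simpa using Nat.le_of_not_lt hp),
          List.getElem?_eq_none (by exact Nat.le_of_not_lt hp)]
  · rw [pvGetDset_ne _ _ _ _ _ hpi]

theorem pvTlen (t : List (List Int)) (i j : Nat) (v : Int) :
    (pvTset t i j v).length = t.length := by
  simp [pvTset]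

-- generic fold-with-invariant over List.range / List.range'
theorem pvFoldRangeInv {α : Type} (f : α → Nat → α) (P : Nat → α → Prop) (m : Nat) (init : α)
    (h0 : P 0 init) (hstep : ∀ k x, k < m → P k x → P (k + 1) (f x k)) :
    P m ((List.range m).foldl f init) := by
  induction m with
  | zero => simpa using h0
  | succ m ih =>
    rw [List.range_succ, List.foldl_append]
    exact hstep m _ (Nat.lt_succ_self m) (ih (fun k x hk => hstep k x (Nat.lt_succ_of_lt hk)))

theorem pvFoldRange'Inv {α : Type} (f : α → Nat → α) (P : Nat → α → Prop) (s m : Nat) (init : α)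
    (h0 : P 0 init) (hstep : ∀ k x, k < m → P k x → P (k + 1) (f x (s + k))) :
    P m ((List.range' s m).foldl f init) := by
  induction m with
  | zero => simpa using h0
  | succ m ih =>
    rw [List.range'_1_concat, List.foldl_append]
    exact hstep m _ (Nat.lt_succ_self m) (ih (fun k x hk => hstep k x (Nat.lt_succ_of_lt hk)))

-- ── A side: table invariant ──

-- the inner loop body of A's DP, named (definitionally equal to the lambda in the port)
def pvBodyA (arr : List Int) (L : Nat) (t : List (List Int)) (i : Nat) : List (List Int) :=
  let j := i + L - 1
  let s := PySem.List.slice arr (some (i : Int)) (some ((j : Int) + 1))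
  let min_ele := (PySem.List.min? s (fun y => y)).getD 0
  let max_ele := (PySem.List.max? s (fun y => y)).getD 0
  if min_ele * 2 ≤ max_ele then
    pvTset t i j (1 + min (pvTget t (i + 1) j) (pvTget t i (j - 1)))
  else t

-- invariant: cells of window length < L (and, at length L, start index < k) hold pvT, rest 0
def pvInvP (a : List Int) (L k : Nat) (t : List (List Int)) : Prop :=
  t.length = a.length ∧ (∀ i, i < a.length → (t.getD i []).length = a.length) ∧
  ∀ i j, pvTget t i j =
    if i < j ∧ j < a.length ∧ (j + 1 + 1 ≤ i + L ∨ (j + 1 = i + L ∧ i < k)) then pvT a i j else 0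

theorem pvStepA (a : List Int) (L : Nat) (hL2 : 2 ≤ L) (hLn : L ≤ a.length)
    (k : Nat) (hk : k < a.length - L + 1) (t : List (List Int)) (h : pvInvP a L k t) :
    pvInvP a L (k + 1) (pvBodyA a L t k) := by
  obtain ⟨ht1, ht2, ht3⟩ := h
  have hkj : k < k + L - 1 := by omega
  have hjn : k + L - 1 < a.length := by omega
  have hg1 : pvTget t (k + 1) (k + L - 1) = pvT a (k + 1) (k + L - 1) := by
    rw [ht3]
    by_cases h1 : k + 1 < k + L - 1
    · rw [if_pos ⟨h1, hjn, Or.inl (by omega)⟩]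
    · rw [if_neg (by omega)]
      conv_rhs => rw [pvT]
      rw [dif_neg h1]
  have hg2 : pvTget t k (k + L - 1 - 1) = pvT a k (k + L - 1 - 1) := by
    rw [ht3]
    by_cases h1 : k < k + L - 1 - 1
    · rw [if_pos ⟨h1, by omega, Or.inl (by omega)⟩]
    · rw [if_neg (by omega)]
      conv_rhs => rw [pvT]
      rw [dif_neg h1]
  simp only [pvBodyA, pvSliceWin]
  have hmn : (PySem.List.min? (pvWin a k (k + L - 1)) (fun y => y)).getD 0 = pvMn a k (k + L - 1) := rfl
  have hmx : (PySem.List.max? (pvWin a k (k + L - 1)) (fun y => y)).getD 0 = pvMx a k (k + L - 1) := rfl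
  rw [hmn, hmx]
  by_cases hc : pvMn a k (k + L - 1) * 2 ≤ pvMx a k (k + L - 1)
  · rw [if_pos hc, hg1, hg2]
    refine ⟨by rw [pvTlen]; exact ht1, fun i hi => by rw [pvTset_rowlen]; exact ht2 i hi,
      fun p q => ?_⟩
    rw [pvTget_pvTset t k (k + L - 1) _ (by omega) (by rw [ht2 k (by omega)]; omega) p q]
    by_cases hpq : p = k ∧ q = k + L - 1
    · obtain ⟨rfl, rfl⟩ := hpq
      rw [if_pos ⟨rfl, rfl⟩, if_pos ⟨hkj, hjn, Or.inr ⟨by omega, by omega⟩⟩]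
      conv_rhs => rw [pvT]
      rw [dif_pos hkj, if_pos hc]
    · rw [if_neg hpq, ht3 p q]
      have hne : p ≠ k ∨ q ≠ k + L - 1 := by tauto
      exact if_congr (by omega) rfl rfl
  · rw [if_neg hc]
    refine ⟨ht1, ht2, fun p q => ?_⟩
    rw [ht3 p q]
    by_cases hpq : p = k ∧ q = k + L - 1
    · obtain ⟨rfl, rfl⟩ := hpq
      rw [if_neg (by omega), if_pos ⟨hkj, hjn, Or.inr ⟨by omega, by omega⟩⟩]
      conv_rhs => rw [pvT]
      rw [dif_pos hkj, if_neg hc]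
    · have hne : p ≠ k ∨ q ≠ k + L - 1 := by tauto
      exact if_congr (by omega) rfl rfl

theorem pvA_eq_T (arr : List Int) (h : arr ≠ []) :
    min_removals arr = pvT arr 0 (arr.length - 1) := by
  have hn : 1 ≤ arr.length := List.length_pos_iff.mpr h
  have hrfl : min_removals arr = pvTget
      ((List.range' 2 (arr.length - 1)).foldl
        (fun t L => (List.range (arr.length - L + 1)).foldl (pvBodyA arr L) t)
        (List.replicate arr.length (List.replicate arr.length 0)))
      0 (arr.length - 1) := rfl
  have h0 : pvInvP arr (0 + 2) 0 (List.replicate arr.length (List.replicate arr.length 0)) := by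
    refine ⟨by simp, fun i hi => ?_, fun i j => ?_⟩
    · rw [List.getD_eq_getElem?_getD, List.getElem?_replicate_of_lt hi]; simp
    · have hz : pvTget (List.replicate arr.length (List.replicate arr.length 0)) i j = 0 := by
        unfold pvTget
        simp only [List.getD_eq_getElem?_getD, List.getElem?_replicate]
        split_ifs <;> simp
      rw [hz, if_neg (by omega)]
  have H := pvFoldRange'Inv
      (f := fun t L => (List.range (arr.length - L + 1)).foldl (pvBodyA arr L) t)
      (P := fun mI t => pvInvP arr (mI + 2) 0 t) 2 (arr.length - 1)
      (List.replicate arr.length (List.replicate arr.length 0)) h0 ?_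
  · obtain ⟨ht1, ht2, ht3⟩ := H
    rw [hrfl, ht3 0 (arr.length - 1)]
    by_cases h2 : 0 < arr.length - 1
    · rw [if_pos ⟨h2, by omega, Or.inl (by omega)⟩]
    · rw [if_neg (by omega)]
      conv_rhs => rw [pvT]
      rw [dif_neg (by omega)]
  · intro mI t hmI hP
    have hinner := pvFoldRangeInv (f := pvBodyA arr (2 + mI))
        (P := fun k t => pvInvP arr (2 + mI) k t) (arr.length - (2 + mI) + 1) t
        (by
          obtain ⟨a1, a2, a3⟩ := hP
          exact ⟨a1, a2, fun i j => by rw [a3 i j]; exact if_congr (by omega) rfl rfl⟩)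
        (fun k x hk hPx => pvStepA arr (2 + mI) (by omega) (by omega) k (by omega) x hPx)
    obtain ⟨a1, a2, a3⟩ := hinner
    exact ⟨a1, a2, fun i j => by rw [a3 i j]; exact if_congr (by omega) rfl rfl⟩

-- ── B side: the scan computes the longest valid window ──

-- the inner and outer loop bodies of B's scan, named (definitionally equal to the port's lambdas)
def pvBodyB (arr : List Int) (i : Nat) (s : Int × Int × Int) (j : Nat) : Int × Int × Int :=
  let lo := min s.2.1 (arr.getD j 0)
  let hi := max s.2.2 (arr.getD j 0)
  ((if 2 * lo > hi then max s.1 ((j : Int) - (i : Int) + 1) else s.1), lo, hi)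

def pvOstepB (arr : List Int) (best : Int) (i : Nat) : Int :=
  ((List.range' (i + 1) (arr.length - (i + 1))).foldl (pvBodyB arr i)
    (best, arr.getD i 0, arr.getD i 0)).1

theorem pvInnerB (a : List Int) (i : Nat) (m k : Nat) (b : Int)
    (hik : i ≤ k) (hk : k < a.length) (hm : m = a.length - (k + 1)) :
    b ≤ ((List.range' (k + 1) m).foldl (pvBodyB a i) (b, pvMn a i k, pvMx a i k)).1 ∧
    (∀ q, k < q → q < a.length → ¬ (pvMn a i q * 2 ≤ pvMx a i q) →
      ((q - i + 1 : Nat) : Int) ≤ ((List.range' (k + 1) m).foldl (pvBodyB a i) (b, pvMn a i k, pvMx a i k)).1) ∧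
    (((List.range' (k + 1) m).foldl (pvBodyB a i) (b, pvMn a i k, pvMx a i k)).1 = b ∨
      ∃ q, k < q ∧ q < a.length ∧ ¬ (pvMn a i q * 2 ≤ pvMx a i q) ∧
        ((List.range' (k + 1) m).foldl (pvBodyB a i) (b, pvMn a i k, pvMx a i k)).1 = ((q - i + 1 : Nat) : Int)) := by
  induction m generalizing k b with
  | zero =>
    refine ⟨le_refl b, ?_, Or.inl rfl⟩
    intro q hq hqn _
    omega
  | succ m ih =>
    have hkn : k + 1 < a.length := by omega
    rw [List.range'_succ, List.foldl_cons]
    have hbody : pvBodyB a i (b, pvMn a i k, pvMx a i k) (k + 1) =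
        ((if 2 * pvMn a i (k + 1) > pvMx a i (k + 1) then
            max b (((k + 1 : Nat) : Int) - (i : Int) + 1) else b),
          pvMn a i (k + 1), pvMx a i (k + 1)) := by
      simp only [pvBodyB]
      rw [← pvMn_snoc a i k hik hkn, ← pvMx_snoc a i k hik hkn]
    rw [hbody]
    set b' : Int := (if 2 * pvMn a i (k + 1) > pvMx a i (k + 1) then
        max b (((k + 1 : Nat) : Int) - (i : Int) + 1) else b) with hb'def
    have hble : b ≤ b' := by
      rw [hb'def]; split_ifs
      · exact le_max_left _ _
      · exact le_refl b
    obtain ⟨P1, P2, P3⟩ := ih (k + 1) b' (by omega) hkn (by omega)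
    refine ⟨le_trans hble P1, ?_, ?_⟩
    · intro q hq hqn hv
      by_cases hqk : q = k + 1
      · subst hqk
        have hcond : 2 * pvMn a i (k + 1) > pvMx a i (k + 1) := by omega
        have hb' : b' = max b (((k + 1 : Nat) : Int) - (i : Int) + 1) := by
          rw [hb'def, if_pos hcond]
        have hcast : (((k + 1) - i + 1 : Nat) : Int) = ((k + 1 : Nat) : Int) - (i : Int) + 1 := by
          push_cast [Nat.cast_sub (by omega : i ≤ k + 1)]; ring
        calc (((k + 1) - i + 1 : Nat) : Int) = ((k + 1 : Nat) : Int) - (i : Int) + 1 := hcast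
          _ ≤ b' := by rw [hb']; exact le_max_right _ _
          _ ≤ _ := P1
      · exact P2 q (by omega) hqn hv
    · rcases P3 with h3 | ⟨q, hq1, hq2, hq3, hq4⟩
      · by_cases hc : 2 * pvMn a i (k + 1) > pvMx a i (k + 1)
        · have hb' : b' = max b (((k + 1 : Nat) : Int) - (i : Int) + 1) := by
            rw [hb'def, if_pos hc]
          rcases max_choice b (((k + 1 : Nat) : Int) - (i : Int) + 1) with hmx | hmx
          · left; rw [h3, hb', hmx]
          · right
            refine ⟨k + 1, by omega, hkn, by omega, ?_⟩
            rw [h3, hb', hmx]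
            push_cast [Nat.cast_sub (by omega : i ≤ k + 1)]; ring
        · left; rw [h3, hb'def, if_neg hc]
      · right; exact ⟨q, by omega, hq2, hq3, hq4⟩

theorem pvOuterB (a : List Int) (m k : Nat) (b : Int)
    (hk : k ≤ a.length) (hm : m = a.length - k) :
    b ≤ (List.range' k m).foldl (pvOstepB a) b ∧
    (∀ p q, k ≤ p → p < q → q < a.length → ¬ (pvMn a p q * 2 ≤ pvMx a p q) →
      ((q - p + 1 : Nat) : Int) ≤ (List.range' k m).foldl (pvOstepB a) b) ∧
    ((List.range' k m).foldl (pvOstepB a) b = b ∨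
      ∃ p q, k ≤ p ∧ p < q ∧ q < a.length ∧ ¬ (pvMn a p q * 2 ≤ pvMx a p q) ∧
        (List.range' k m).foldl (pvOstepB a) b = ((q - p + 1 : Nat) : Int)) := by
  induction m generalizing k b with
  | zero =>
    refine ⟨le_refl b, ?_, Or.inl rfl⟩
    intro p q hp hpq hqn _
    omega
  | succ m ih =>
    have hkn : k < a.length := by omega
    rw [List.range'_succ, List.foldl_cons]
    have hstep : ((List.range' (k + 1) (a.length - (k + 1))).foldl (pvBodyB a k)
          (b, pvMn a k k, pvMx a k k)).1 = pvOstepB a b k := by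
      rw [pvOstepB, pvMn_self a k hkn, pvMx_self a k hkn]
    have hk1 : k + 1 ≤ a.length := hkn
    have hm1 : m = a.length - (k + 1) := by omega
    obtain ⟨Q1, Q2, Q3⟩ := pvInnerB a k (a.length - (k + 1)) k b (le_refl k) hkn rfl
    rw [hstep] at Q1 Q2 Q3
    obtain ⟨P1, P2, P3⟩ := ih (k + 1) (pvOstepB a b k) hk1 hm1
    refine ⟨le_trans Q1 P1, ?_, ?_⟩
    · intro p q hp hpq hqn hv
      rcases Nat.eq_or_lt_of_le hp with rfl | hlt
      · exact le_trans (Q2 q hpq hqn hv) P1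
      · exact P2 p q hlt hpq hqn hv
    · rcases P3 with h3 | ⟨p, q, h1, h2, h4, h5, h6⟩
      · rcases Q3 with h4 | ⟨q, hq1, hq2, hq3, hq4⟩
        · left; rw [h3, h4]
        · right; exact ⟨k, q, le_refl k, hq1, hq2, hq3, by rw [h3, hq4]⟩
      · right; exact ⟨p, q, by omega, h2, h4, h5, h6⟩

theorem pvB_eq (arr : List Int) (h : arr ≠ []) :
    min_removals_alt arr = (arr.length : Int) - (pvM arr 0 (arr.length - 1) : Int) := by
  have hrfl : min_removals_alt arr =
      (arr.length : Int) - (List.range arr.length).foldl (pvOstepB arr) 1 := rfl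
  have hn : 1 ≤ arr.length := List.length_pos_iff.mpr h
  obtain ⟨P1, P2, P3⟩ := pvOuterB arr arr.length 0 1 (Nat.zero_le _) (by omega)
  rw [hrfl, List.range_eq_range']
  have hle1 : (List.range' 0 arr.length).foldl (pvOstepB arr) 1 ≤
      (pvM arr 0 (arr.length - 1) : Int) := by
    rcases P3 with h3 | ⟨p, q, _, h2, h4, h5, h6⟩
    · rw [h3]; exact_mod_cast pvM_pos arr 0 (arr.length - 1)
    · rw [h6]
      exact_mod_cast pvM_ub arr 0 (arr.length - 1) p q (Nat.zero_le p) h2 (by omega) h5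
  have hle2 : (pvM arr 0 (arr.length - 1) : Int) ≤
      (List.range' 0 arr.length).foldl (pvOstepB arr) 1 := by
    rcases pvM_wit arr 0 (arr.length - 1) with h1 | ⟨p, q, _, h3, h4, h5, h6⟩
    · rw [h1]; exact_mod_cast P1
    · rw [h6]; exact_mod_cast P2 p q (Nat.zero_le p) h3 (by omega) h5
  omega

-- ===== VERDICT (by name: the statement is the Claim_ definition above) =====
theorem min_removals_spec : Claim_equal_min_removals := by
  intro arr _ hpre
  unfold Spec_min_removals
  rw [pvA_eq_T arr hpre, pvB_eq arr hpre, pvT_eq]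
  have hn : 1 ≤ arr.length := List.length_pos_iff.mpr hpre
  have h1 : (arr.length - 1 - 0 + 1 : Nat) = arr.length := by omega
  rw [h1]
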